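-- pv_equiv track=rewrite | github.com/jweezy24/Fuzzy_vault | src/tests/general_hamming.py | find_all_hamming_codes
-- ===== SOURCE A (Python) =====
-- def mat_mult_encoding(a,b):
--     ret = ''
--     for row in b:
--         sum = 0
--         for i in range(0,len(row)):
--             sum += (int(a[i]) * int(row[i]))
--         ret += str(sum%2)
--     return ret
--
-- def find_all_hamming_codes(num, G):
--     nums = (2**num) - 1
--     codes = []
--     for i in range(0, nums):
--         binary = format(i, f'0{num}b')
--         code = mat_mult_encoding(binary, G)
--         count = 0
--         for j in codes:
--             if j == code:
--                 break
--             else: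
--                 count+=1
--         if count >= len(codes):
--             codes.append(code)
--             count = 0
--     return codes
-- ===== SOURCE B (Python) =====
-- def find_all_hamming_codes(num, G):
--     n = len(G)
--     # column images: cols[i][j] = G[j][i] mod 2 (0 when row j is shorter than i+1)
--     cols = []
--     for i in range(num):
--         cols.append([(row[i] % 2) if i < len(row) else 0 for row in G])
--     codes = []
--     seen = set()
--     for i in range(2 ** num - 1):
--         binary = format(i, f'0{num}b')
--         acc = [0] * n
--         for pos, ch in enumerate(binary):
--             if ch == '1':
--                 col = cols[pos]
--                 acc = [(x + y) % 2 for x, y in zip(acc, col)]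
--         code = ''.join(str(v) for v in acc)
--         if code not in seen:
--             seen.add(code)
--             codes.append(code)
--     return codes
-- ===== Notes on version B (the rewrite author's own statement) =====
-- stated objective: faster
-- what changed: B precomputes the mod-2 column images of G once and builds each codeword by XOR-accumulating the columns at the message's set bits, and replaces A's linear scan over the collected codes by a hash-set membership test.
import Mathlib
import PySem

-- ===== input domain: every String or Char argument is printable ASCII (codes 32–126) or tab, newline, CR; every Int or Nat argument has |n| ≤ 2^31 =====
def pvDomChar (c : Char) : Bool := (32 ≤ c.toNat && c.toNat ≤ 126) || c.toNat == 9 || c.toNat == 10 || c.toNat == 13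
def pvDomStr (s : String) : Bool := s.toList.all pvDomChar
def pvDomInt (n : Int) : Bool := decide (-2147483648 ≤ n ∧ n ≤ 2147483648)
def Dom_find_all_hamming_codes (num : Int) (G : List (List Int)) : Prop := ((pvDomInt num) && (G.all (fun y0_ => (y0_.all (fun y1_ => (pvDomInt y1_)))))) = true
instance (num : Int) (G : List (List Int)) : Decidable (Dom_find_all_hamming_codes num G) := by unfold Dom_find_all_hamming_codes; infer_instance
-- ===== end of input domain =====

-- B replaces A's per-message matrix multiply and linear duplicate scan by precomputed mod-2
-- column images of G, XOR-accumulated over the message's set bits, plus a set for dedup (faster).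

-- ===== PORT A =====
-- the inner `for j in codes: if j == code: break / else: count += 1` loop of A
def pvCountLoop : List String → String → Nat
  | [], _ => 0
  | j :: rest, code => if j == code then 0 else pvCountLoop rest code + 1

def mat_mult_encoding (a : List Char) (b : List (List Int)) : List Char :=
  b.foldl (fun ret row =>
    let sum := (PySem.List.pyRange 0 (row.length : Int) 1).foldl
      (fun s i =>
        s + ((PySem.Int.ofChars? (((PySem.List.pyGet? a i).map (fun c => [c])).getD [])).getD 0)
            * ((PySem.List.pyGet? row i).getD 0)) 0
    ret ++ PySem.Int.toChars (PySem.Int.mod sum 2)) []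

def find_all_hamming_codes (num : Int) (G : List (List Int)) : List String :=
  let nums : Int := 2 ^ num.toNat - 1
  (PySem.List.pyRange 0 nums 1).foldl (fun codes i =>
    let binary := PySem.Chars.zfill (PySem.Int.toBinChars i) num
    let code := String.ofList (mat_mult_encoding binary G)
    let count := pvCountLoop codes code
    if count ≥ codes.length then codes ++ [code] else codes) []

-- ===== PORT B =====
-- `(row[i] % 2) if i < len(row) else 0`
def pvColOf (i : Int) (row : List Int) : Int :=
  if i < (row.length : Int) then PySem.Int.mod ((PySem.List.pyGet? row i).getD 0) 2 else 0

-- the `cols` table built by the first loop of B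
def pvCols (num : Int) (G : List (List Int)) : List (List Int) :=
  (PySem.List.pyRange 0 num 1).foldl (fun cs i => cs ++ [G.map (pvColOf i)]) []

def find_all_hamming_codes_alt (num : Int) (G : List (List Int)) : List String :=
  let n := G.length
  let cols := pvCols num G
  ((PySem.List.pyRange 0 (2 ^ num.toNat - 1) 1).foldl (fun st i =>
      let binary := PySem.Chars.zfill (PySem.Int.toBinChars i) num
      let acc := (PySem.List.enumerate binary).foldl (fun acc pc =>
          if pc.2 = '1' then
            (acc.zip ((PySem.List.pyGet? cols pc.1).getD [])).map
              (fun xy => PySem.Int.mod (xy.1 + xy.2) 2)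
          else acc) (List.replicate n (0 : Int))
      let code := String.ofList (PySem.Chars.join [] (acc.map PySem.Int.toChars))
      if !(st.2.contains code) then (st.1 ++ [code], st.2.add code) else st)
    (([] : List String), (PySem.Set.ofList ([] : List String)))).1

-- ===== PRECONDITION & SPEC =====
-- Pre_ excludes num < 0 (Python's 2**num is a float there, so range(0, 2**num - 1) raises
-- TypeError) and num ≥ 1 with some row of G longer than num (IndexError when
-- mat_mult_encoding indexes the num-character message string past its end).
def Pre_find_all_hamming_codes (num : Int) (G : List (List Int)) : Prop :=
  0 ≤ num ∧ (num = 0 ∨ ∀ row ∈ G, (row.length : Int) ≤ num)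
instance (num : Int) (G : List (List Int)) : Decidable (Pre_find_all_hamming_codes num G) := by
  unfold Pre_find_all_hamming_codes; infer_instance

def pvWitness_find_all_hamming_codes : Int × List (List Int) :=
  (3, [[1, 0, 0], [0, 1, 0], [0, 0, 1], [1, 1, 0], [1, 0, 1]])

def Spec_find_all_hamming_codes (num : Int) (G : List (List Int)) (out : List String) : Prop :=
  out = find_all_hamming_codes_alt num G
instance (num : Int) (G : List (List Int)) (out : List String) :
    Decidable (Spec_find_all_hamming_codes num G out) := by
  unfold Spec_find_all_hamming_codes; infer_instance

-- ===== CLAIM (what is proved, stated in full; the proofs are below) =====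
def Claim_equal_find_all_hamming_codes : Prop :=
  ∀ (num : Int) (G : List (List Int)), Dom_find_all_hamming_codes num G →
    Pre_find_all_hamming_codes num G →
    Spec_find_all_hamming_codes num G (find_all_hamming_codes num G)

-- ===== LEMMAS AND PROOFS =====
lemma pvToDigitsCore_chars (f : Nat) : ∀ (n : Nat) (l : List Char) (c : Char),
    c ∈ Nat.toDigitsCore 2 f n l → c ∈ l ∨ c = '0' ∨ c = '1' := by
  induction f with
  | zero => intro n l c h; simp only [Nat.toDigitsCore] at h; exact Or.inl h
  | succ f ih =>
    intro n l c h
    have hd : Nat.digitChar (n % 2) = '0' ∨ Nat.digitChar (n % 2) = '1' := by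
      have h2 := Nat.mod_lt n (y := 2) (by omega)
      interval_cases hm : n % 2 <;> simp [Nat.digitChar]
    simp only [Nat.toDigitsCore] at h
    by_cases hz : n / 2 = 0
    · rw [if_pos hz] at h
      rcases List.mem_cons.1 h with h | h
      · subst h; tauto
      · exact Or.inl h
    · rw [if_neg hz] at h
      rcases ih (n / 2) _ c h with h' | h'
      · rcases List.mem_cons.1 h' with h'' | h''
        · subst h''; tauto
        · exact Or.inl h''
      · exact Or.inr h'

lemma pvZfill_chars (cs : List Char) (w : Int) (c : Char) (h : c ∈ PySem.Chars.zfill cs w) :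
    c ∈ cs ∨ c = '0' := by
  unfold PySem.Chars.zfill at h
  split at h
  · exact Or.inl h
  · split at h
    · split at h
      · rcases List.mem_cons.1 h with h | h
        · subst h; exact Or.inl (by simp)
        · rcases List.mem_append.1 h with h | h
          · exact Or.inr (List.eq_of_mem_replicate h)
          · exact Or.inl (List.mem_cons_of_mem _ h)
      · rcases List.mem_append.1 h with h | h
        · exact Or.inr (List.eq_of_mem_replicate h)
        · exact Or.inl h
    · exact Or.inr (List.eq_of_mem_replicate h)

lemma pvJoin_nil_flatten (l : List (List Char)) : PySem.Chars.join [] l = l.flatten := by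
  unfold PySem.Chars.join List.intercalate
  induction l with
  | nil => rfl
  | cons x xs ih =>
    cases xs with
    | nil => simp
    | cons y ys =>
      rw [List.intersperse_cons₂] at *
      simp only [List.flatten_cons] at *
      simp [ih]

lemma pvCountLoop_ge (codes : List String) (code : String) :
    (codes.length ≤ pvCountLoop codes code) ↔ code ∉ codes := by
  induction codes with
  | nil => simp [pvCountLoop]
  | cons j rest ih =>
    simp only [pvCountLoop, List.length_cons, List.mem_cons]
    by_cases hj : j = code
    · subst hj; simp
    · rw [if_neg (by simpa using hj)]
      constructor
      · intro h hc
        rcases hc with hc | hc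
        · exact hj hc.symm
        · exact (ih.1 (by omega)) hc
      · intro h
        have h2 := ih.2 (fun hr => h (Or.inr hr))
        omega

lemma pvCols_eq (num : Int) (G : List (List Int)) :
    pvCols num G = (PySem.List.pyRange 0 num 1).map (fun i => G.map (pvColOf i)) := by
  unfold pvCols
  simpa using PySem.List.foldl_append_singleton_eq_map
    (fun i => G.map (pvColOf i)) (PySem.List.pyRange 0 num 1) []

lemma pvCols_get (num : Int) (G : List (List Int)) (p : Int) (h0 : 0 ≤ p) (hp : p < num) :
    (PySem.List.pyGet? (pvCols num G) p).getD [] = G.map (pvColOf p) := by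
  rw [pvCols_eq]
  have hn : (0 : Int) ≤ num := le_of_lt (lt_of_le_of_lt h0 hp)
  obtain ⟨m, rfl⟩ : ∃ m : Nat, num = (m : Int) := ⟨num.toNat, (Int.toNat_of_nonneg hn).symm⟩
  obtain ⟨q, rfl⟩ : ∃ q : Nat, p = (q : Int) := ⟨p.toNat, (Int.toNat_of_nonneg h0).symm⟩
  have hq : q < m := by exact_mod_cast hp
  rw [PySem.List.pyRange_zero_natCast, List.map_map, PySem.List.pyGet?_natCast]
  simp [hq]

def pvSStep (row : List Int) : Int → (Int × Char) → Int :=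
  fun a pc => if pc.2 = '1' then PySem.Int.mod (a + pvColOf pc.1 row) 2 else a

lemma pvScalar_fold (row : List Int) (bs : List Char) : ∀ (s a : Int), 0 ≤ a → a < 2 →
    (PySem.List.enumerate bs s).foldl (pvSStep row) a
      = PySem.Int.mod (a + ((PySem.List.enumerate bs s).map
          (fun pc => (if pc.2 = '1' then (1 : Int) else 0) * pvColOf pc.1 row)).sum) 2 := by
  induction bs with
  | nil =>
    intro s a h0 h2
    simp [PySem.List.enumerate_nil, Int.emod_eq_of_lt h0 h2]
  | cons c cs ih =>
    intro s a h0 h2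
    rw [PySem.List.enumerate_cons]
    by_cases hc : c = '1'
    · simp only [List.foldl_cons, List.map_cons, List.sum_cons, pvSStep, hc, if_true]
      rw [ih (s + 1) _ (PySem.Int.mod_nonneg _ (by norm_num)) (PySem.Int.mod_lt _ (by norm_num))]
      rw [PySem.Int.mod_eq_emod_of_pos (show (0:Int) < 2 by norm_num),
          PySem.Int.mod_eq_emod_of_pos (show (0:Int) < 2 by norm_num),
          PySem.Int.mod_eq_emod_of_pos (show (0:Int) < 2 by norm_num)]
      rw [Int.emod_add_emod]
      congr 1; ring
    · simp only [List.foldl_cons, List.map_cons, List.sum_cons, pvSStep, hc, if_false]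
      rw [ih (s + 1) a h0 h2]
      congr 1; ring

lemma pvVec_fold (num : Int) (G : List (List Int)) (ps : List (Int × Char)) :
    (∀ p ∈ ps, 0 ≤ p.1 ∧ p.1 < num) → ∀ (f : List Int → Int),
    ps.foldl (fun acc pc =>
        if pc.2 = '1' then
          (acc.zip ((PySem.List.pyGet? (pvCols num G) pc.1).getD [])).map
            (fun xy => PySem.Int.mod (xy.1 + xy.2) 2)
        else acc) (G.map f)
      = G.map (fun row => ps.foldl (pvSStep row) (f row)) := by
  induction ps with
  | nil => intro _ f; simp
  | cons p ps ih =>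
    intro hps f
    have hp := hps p (by simp)
    have hps' : ∀ q ∈ ps, 0 ≤ q.1 ∧ q.1 < num := fun q hq => hps q (by simp [hq])
    simp only [List.foldl_cons]
    by_cases hc : p.2 = '1'
    · rw [if_pos hc, pvCols_get num G p.1 hp.1 hp.2, List.zip_map', List.map_map]
      refine (ih hps' (fun row => PySem.Int.mod (f row + pvColOf p.1 row) 2)).trans ?_
      apply List.map_congr_left
      intro row _
      simp [pvSStep, hc]
    · rw [if_neg hc]
      refine (ih hps' f).trans ?_
      apply List.map_congr_left
      intro row _
      simp [pvSStep, hc]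

lemma pvSum_mod_congr {α : Type} (l : List α) (f g : α → Int)
    (h : ∀ x ∈ l, f x % 2 = g x % 2) : (l.map f).sum % 2 = (l.map g).sum % 2 := by
  induction l with
  | nil => rfl
  | cons x xs ih =>
    simp only [List.map_cons, List.sum_cons]
    have h1 : f x % 2 = g x % 2 := h x (by simp)
    have h2 := ih (fun y hy => h y (by simp [hy]))
    rw [Int.add_emod, h1, h2, ← Int.add_emod]

lemma pvRow_val (num : Int) (row : List Int) (bs : List Char)
    (hrow : (row.length : Int) ≤ num)
    (hlen : (bs.length : Int) = num)
    (hch : ∀ c ∈ bs, c = '0' ∨ c = '1') :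
    PySem.Int.mod ((PySem.List.pyRange 0 (row.length : Int) 1).foldl
      (fun s i => s + ((PySem.Int.ofChars? (((PySem.List.pyGet? bs i).map (fun c => [c])).getD [])).getD 0)
          * ((PySem.List.pyGet? row i).getD 0)) 0) 2
    = (PySem.List.enumerate bs).foldl (pvSStep row) 0 := by
  rw [pvScalar_fold row bs 0 0 le_rfl (by norm_num)]
  rw [PySem.List.foldl_add]
  rw [PySem.List.enumerate_eq_map_pyRange bs '0']
  have hlen' : PySem.List.len bs = num := by simpa [PySem.List.len] using hlen
  rw [hlen', List.map_map]
  have hnn : (0 : Int) ≤ (row.length : Int) := by positivity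
  rw [PySem.List.pyRange_one_append 0 (row.length : Int) num hnn hrow]
  rw [List.map_append, List.sum_append]
  have hz : ((PySem.List.pyRange (row.length : Int) num 1).map
      ((fun pc => (if pc.2 = '1' then (1 : Int) else 0) * pvColOf pc.1 row) ∘
        (fun j => (j, PySem.List.pyGetD bs j '0')))).sum = 0 := by
    apply List.sum_eq_zero
    intro x hx
    rcases List.mem_map.1 hx with ⟨j, hj, rfl⟩
    have hb := PySem.List.mem_pyRange_one.1 hj
    have : pvColOf j row = 0 := by unfold pvColOf; rw [if_neg (by omega)]
    simp [this]
  rw [hz, add_zero, zero_add, zero_add]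
  rw [PySem.Int.mod_eq_emod_of_pos (show (0:Int) < 2 by norm_num),
      PySem.Int.mod_eq_emod_of_pos (show (0:Int) < 2 by norm_num)]
  apply pvSum_mod_congr
  intro j hj
  have hb := PySem.List.mem_pyRange_one.1 hj
  have hjbs : j < (bs.length : Int) := by omega
  have hgbs : PySem.List.pyGet? bs j = some (bs[j.toNat]) :=
    PySem.List.pyGet?_eq_some_getElem bs hb.1 hjbs
  have hgrow : PySem.List.pyGet? row j = some (row[j.toNat]) :=
    PySem.List.pyGet?_eq_some_getElem row hb.1 hb.2
  have hgD : PySem.List.pyGetD bs j '0' = bs[j.toNat] := by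
    simp [PySem.List.pyGetD, hgbs]
  have hcol : pvColOf j row = PySem.Int.mod (row[j.toNat]) 2 := by
    unfold pvColOf; rw [if_pos hb.2, hgrow]; rfl
  have hmem : bs[j.toNat] ∈ bs := List.getElem_mem _
  rcases hch _ hmem with hc | hc
  · have h0v : ((PySem.Int.ofChars? ['0']).getD 0) = 0 := by decide
    simp only [Function.comp, hgD, hc, hgbs, Option.map_some, Option.getD_some, h0v]
    rw [if_neg (by decide), zero_mul]
    simp
  · have h1 : ((PySem.Int.ofChars? ['1']).getD 0) = 1 := by decide
    simp only [Function.comp, hgD, hc, hgrow, hcol, hgbs, Option.map_some,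
      Option.getD_some, h1, if_true, one_mul]
    rw [PySem.Int.mod_eq_emod_of_pos (show (0:Int) < 2 by norm_num)]
    rw [Int.emod_emod_of_dvd _ dvd_rfl]

lemma pvBin_chars (num i : Int) (h0 : 0 ≤ i)
    (c : Char) (hc : c ∈ PySem.Chars.zfill (PySem.Int.toBinChars i) num) :
    c = '0' ∨ c = '1' := by
  rcases pvZfill_chars _ _ _ hc with h | h
  · unfold PySem.Int.toBinChars at h
    rw [if_neg (by omega)] at h
    unfold Nat.toDigits at h
    rcases pvToDigitsCore_chars _ _ _ _ h with h' | h'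
    · simp at h'
    · exact h'
  · exact Or.inl h

lemma pvBin_len (num i : Int) (hnum : 1 ≤ num) (h0 : 0 ≤ i) (hi : i < 2 ^ num.toNat - 1) :
    ((PySem.Chars.zfill (PySem.Int.toBinChars i) num).length : Int) = num := by
  have hlt : i.toNat < 2 ^ num.toNat := by
    have h1 : ((2 ^ num.toNat : Nat) : Int) = 2 ^ num.toNat := by push_cast; ring
    omega
  have hle : (PySem.Int.toBinChars i).length ≤ num.toNat := by
    unfold PySem.Int.toBinChars
    rw [if_neg (by omega)]
    exact Nat.toDigits_length 2 i.toNat num.toNat (by omega) hlt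
  rw [PySem.Chars.length_zfill]
  omega

lemma pvCode_eq (num : Int) (G : List (List Int))
    (hrows : ∀ row ∈ G, (row.length : Int) ≤ num)
    (i : Int) (hnum : 1 ≤ num) (h0 : 0 ≤ i) (hi : i < 2 ^ num.toNat - 1) :
    mat_mult_encoding (PySem.Chars.zfill (PySem.Int.toBinChars i) num) G
    = PySem.Chars.join []
        (((PySem.List.enumerate (PySem.Chars.zfill (PySem.Int.toBinChars i) num)).foldl
          (fun acc pc =>
            if pc.2 = '1' then
              (acc.zip ((PySem.List.pyGet? (pvCols num G) pc.1).getD [])).map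
                (fun xy => PySem.Int.mod (xy.1 + xy.2) 2)
            else acc) (List.replicate G.length (0 : Int))).map PySem.Int.toChars) := by
  set bs := PySem.Chars.zfill (PySem.Int.toBinChars i) num with hbs
  have hlen : (bs.length : Int) = num := pvBin_len num i hnum h0 hi
  have hch : ∀ c ∈ bs, c = '0' ∨ c = '1' := fun c hc => pvBin_chars num i h0 c hc
  have hrep : List.replicate G.length (0 : Int) = G.map (fun _ => 0) := by
    simp [List.map_const']
  have hpos : ∀ p ∈ PySem.List.enumerate bs, 0 ≤ p.1 ∧ p.1 < num := by
    intro p hp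
    rcases (PySem.List.mem_enumerate_iff _ _ _).1 hp with ⟨k, hk, rfl⟩
    constructor
    · simp
    · simp only [zero_add]
      calc (k : Int) < (bs.length : Int) := by exact_mod_cast hk
        _ = num := hlen
  rw [hrep, pvVec_fold num G _ hpos (fun _ => 0)]
  rw [pvJoin_nil_flatten, List.map_map, ← List.flatMap]
  unfold mat_mult_encoding
  rw [PySem.List.foldl_append_eq_flatMap
    (fun row => PySem.Int.toChars (PySem.Int.mod ((PySem.List.pyRange 0 (row.length : Int) 1).foldl
      (fun s i =>
        s + ((PySem.Int.ofChars? (((PySem.List.pyGet? bs i).map (fun c => [c])).getD [])).getD 0)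
            * ((PySem.List.pyGet? row i).getD 0)) 0) 2)) G []]
  rw [List.nil_append]
  unfold List.flatMap
  congr 1
  apply List.map_congr_left
  intro row hrow
  have := pvRow_val num row bs (hrows row hrow) hlen hch
  simp only [Function.comp]
  rw [this]

lemma pvDedup_fold (cA cB : Int → String) (L : List Int) :
    (∀ i ∈ L, cA i = cB i) →
    ∀ (codes : List String) (seen : PySem.Set String),
    (∀ x : String, x ∈ seen ↔ x ∈ codes) →
    L.foldl (fun codes i =>
        if pvCountLoop codes (cA i) ≥ codes.length then codes ++ [cA i] else codes) codes
    = (L.foldl (fun st i =>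
        if !(st.2.contains (cB i)) then (st.1 ++ [cB i], st.2.add (cB i)) else st)
        (codes, seen)).1 := by
  induction L with
  | nil => intro _ codes seen _; rfl
  | cons i L ih =>
    intro hc codes seen hs
    have hci : cA i = cB i := hc i (by simp)
    simp only [List.foldl_cons]
    by_cases hmem : cB i ∈ codes
    · have h1 : ¬ (codes.length ≤ pvCountLoop codes (cA i)) := by
        rw [pvCountLoop_ge]; simpa [hci] using hmem
      rw [if_neg (by simpa [ge_iff_le] using h1),
          if_neg (by simp; exact (hs _).2 hmem)]
      exact ih (fun j hj => hc j (by simp [hj])) codes seen hs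
    · have h1 : codes.length ≤ pvCountLoop codes (cA i) := by
        rw [pvCountLoop_ge, hci]; exact hmem
      rw [if_pos (by simpa [ge_iff_le] using h1),
          if_pos (by simp; intro hx; exact hmem ((hs _).1 hx)), hci]
      apply ih (fun j hj => hc j (by simp [hj]))
      intro x
      rw [PySem.Set.mem_add, List.mem_append]
      simp [hs x]

-- ===== VERDICT (by name: the statement is the Claim_ definition above) =====
theorem find_all_hamming_codes_spec : Claim_equal_find_all_hamming_codes := by
  intro num G _hdom hpre
  unfold Spec_find_all_hamming_codes
  obtain ⟨hnn, hpre2⟩ := hpre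
  by_cases hz : num = 0
  · subst hz
    have h0 : PySem.List.pyRange 0 ((2 : Int) ^ (0 : Int).toNat - 1) 1 = [] := by decide
    unfold find_all_hamming_codes find_all_hamming_codes_alt
    rw [h0]
    rfl
  · have hnum : 1 ≤ num := by omega
    have hrows : ∀ row ∈ G, (row.length : Int) ≤ num := by
      rcases hpre2 with h | h
      · exact absurd h hz
      · exact h
    unfold find_all_hamming_codes find_all_hamming_codes_alt
    exact pvDedup_fold
      (fun i => String.ofList (mat_mult_encoding (PySem.Chars.zfill (PySem.Int.toBinChars i) num) G))
      (fun i => String.ofList (PySem.Chars.join []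
        (((PySem.List.enumerate (PySem.Chars.zfill (PySem.Int.toBinChars i) num)).foldl
          (fun acc pc =>
            if pc.2 = '1' then
              (acc.zip ((PySem.List.pyGet? (pvCols num G) pc.1).getD [])).map
                (fun xy => PySem.Int.mod (xy.1 + xy.2) 2)
            else acc) (List.replicate G.length (0 : Int))).map PySem.Int.toChars)))
      (PySem.List.pyRange 0 (2 ^ num.toNat - 1) 1)
      (by
        intro i hi
        have hb := PySem.List.mem_pyRange_one.1 hi
        exact congrArg String.ofList (pvCode_eq num G hrows i hnum hb.1 hb.2))
      [] (PySem.Set.ofList [])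
      (by intro x; simp)
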